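-- pv_equiv track=rewrite | github.com/Bocchiid/WZU-Python-Programming-25fa | Experiment_07/7.3 股票分析(project)/涨幅和成交量.py | uplift_and_volumes
-- ===== SOURCE A (Python) =====
-- def uplift_and_volumes(top_uplift, top_volumes):
--     """
--     @参数 top_high，最高价在前10名的股票代码，字符串
--     @参数 top_volumes，成交量在前10名的股票代码，字符串
--     返回一个列表，其元素依序为以下4个：
--     涨幅和成交量均在前10名的股票，按股票代码升序，列表
--     涨幅或成交量在前10名的股票,按股票代码升序，列表
--     涨幅前10名，但成交量未进前10名的股票,按股票代码升序，列表
--     涨幅和成交量不同时在前10名的股票,按股票代码升序，列表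
--     """
--     # 补充你的代码
--     u_set = set(top_uplift)
--     v_set = set(top_volumes)
--
--     u_and_v_0 = u_set & v_set
--     u_and_v_1 = u_set | v_set
--     u_and_v_2 = u_set - v_set
--     u_and_v_3 = u_set ^ v_set
--
--     ls_0 = [x for x in u_and_v_0]
--     ls_0.sort()
--     ls_1 = [x for x in u_and_v_1]
--     ls_1.sort()
--     ls_2 = [x for x in u_and_v_2]
--     ls_2.sort()
--     ls_3 = [x for x in u_and_v_3]
--     ls_3.sort()
--
--     return [ls_0, ls_1, ls_2, ls_3]
-- ===== SOURCE B (Python) =====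
-- def uplift_and_volumes(top_uplift, top_volumes):
--     u_set = set(top_uplift)
--     v_set = set(top_volumes)
--     union = sorted(u_set | v_set)
--     inter, u_only, sym = [], [], []
--     for x in union:
--         in_u = x in u_set
--         in_v = x in v_set
--         if in_u and in_v:
--             inter.append(x)
--         if in_u and not in_v:
--             u_only.append(x)
--         if in_u != in_v:
--             sym.append(x)
--     return [inter, union, u_only, sym]
-- ===== Notes on version B (the rewrite author's own statement) =====
-- stated objective: alternative
-- what changed: B computes the sorted union once and classifies its elements in a single pass into intersection, u-only and symmetric-difference lists, instead of building four separate sets and sorting each independently.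
import Mathlib
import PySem

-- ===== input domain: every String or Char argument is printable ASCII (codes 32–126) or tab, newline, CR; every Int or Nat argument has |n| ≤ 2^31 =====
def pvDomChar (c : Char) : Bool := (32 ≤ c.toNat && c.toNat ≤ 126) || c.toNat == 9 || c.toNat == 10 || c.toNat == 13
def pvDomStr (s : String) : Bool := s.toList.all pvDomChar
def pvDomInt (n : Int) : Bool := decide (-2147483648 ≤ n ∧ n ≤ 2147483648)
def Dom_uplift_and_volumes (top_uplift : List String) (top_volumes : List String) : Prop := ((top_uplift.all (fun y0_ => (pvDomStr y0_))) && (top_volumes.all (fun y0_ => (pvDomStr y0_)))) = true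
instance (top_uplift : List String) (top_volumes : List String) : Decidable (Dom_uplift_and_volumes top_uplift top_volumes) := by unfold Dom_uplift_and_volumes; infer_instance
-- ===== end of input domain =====

-- B classifies the sorted union in a single pass instead of sorting four independently built sets (alternative decomposition, same cost).

-- ===== PORT A =====
def uplift_and_volumes (top_uplift : List String) (top_volumes : List String) : List (List String) :=
  let u_set : PySem.Set String := PySem.Set.ofList top_uplift
  let v_set : PySem.Set String := PySem.Set.ofList top_volumes
  let u_and_v_0 := PySem.Set.inter u_set v_set
  let u_and_v_1 := PySem.Set.union u_set v_set
  let u_and_v_2 := PySem.Set.diff u_set v_set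
  let u_and_v_3 := PySem.Set.symmDiff u_set v_set
  -- [x for x in s] then .sort(): the sort makes the result independent of set iteration order
  let ls_0 := PySem.List.sorted u_and_v_0 (fun x => x) false
  let ls_1 := PySem.List.sorted u_and_v_1 (fun x => x) false
  let ls_2 := PySem.List.sorted u_and_v_2 (fun x => x) false
  let ls_3 := PySem.List.sorted u_and_v_3 (fun x => x) false
  [ls_0, ls_1, ls_2, ls_3]

-- ===== PORT B =====
def uplift_and_volumes_alt (top_uplift : List String) (top_volumes : List String) : List (List String) :=
  let u_set : PySem.Set String := PySem.Set.ofList top_uplift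
  let v_set : PySem.Set String := PySem.Set.ofList top_volumes
  let union := PySem.List.sorted (PySem.Set.union u_set v_set) (fun x => x) false
  let acc := union.foldl (fun (acc : List String × List String × List String) x =>
    let in_u := PySem.Set.contains u_set x
    let in_v := PySem.Set.contains v_set x
    let acc := if in_u && in_v then (acc.1 ++ [x], acc.2.1, acc.2.2) else acc
    let acc := if in_u && !in_v then (acc.1, acc.2.1 ++ [x], acc.2.2) else acc
    let acc := if in_u != in_v then (acc.1, acc.2.1, acc.2.2 ++ [x]) else acc
    acc) ([], [], [])
  [acc.1, union, acc.2.1, acc.2.2]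

-- ===== PRECONDITION & SPEC =====
def Spec_uplift_and_volumes (top_uplift : List String) (top_volumes : List String) (out : List (List String)) : Prop := out = uplift_and_volumes_alt top_uplift top_volumes
instance (top_uplift : List String) (top_volumes : List String) (out : List (List String)) : Decidable (Spec_uplift_and_volumes top_uplift top_volumes out) := by unfold Spec_uplift_and_volumes; infer_instance

-- ===== CLAIM (what is proved, stated in full; the proofs are below) =====
def Claim_equal_uplift_and_volumes : Prop := ∀ (top_uplift : List String) (top_volumes : List String), Dom_uplift_and_volumes top_uplift top_volumes → Spec_uplift_and_volumes top_uplift top_volumes (uplift_and_volumes top_uplift top_volumes)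

-- ===== LEMMAS AND PROOFS =====

-- B's single-pass loop computes the three filters of its input list.
theorem foldl_classify (u v : PySem.Set String) (l : List String) (a b c : List String) :
    l.foldl (fun (acc : List String × List String × List String) x =>
      let in_u := PySem.Set.contains u x
      let in_v := PySem.Set.contains v x
      let acc := if in_u && in_v then (acc.1 ++ [x], acc.2.1, acc.2.2) else acc
      let acc := if in_u && !in_v then (acc.1, acc.2.1 ++ [x], acc.2.2) else acc
      let acc := if in_u != in_v then (acc.1, acc.2.1, acc.2.2 ++ [x]) else acc
      acc) (a, b, c)
    = (a ++ l.filter (fun x => PySem.Set.contains u x && PySem.Set.contains v x),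
       b ++ l.filter (fun x => PySem.Set.contains u x && !PySem.Set.contains v x),
       c ++ l.filter (fun x => PySem.Set.contains u x != PySem.Set.contains v x)) := by
  induction l generalizing a b c with
  | nil => simp
  | cons x xs ih =>
      cases hu : PySem.Set.contains u x <;> cases hv : PySem.Set.contains v x <;>
        simp only [List.foldl_cons, List.filter_cons, hu, hv, Bool.and_false, Bool.false_and,
          Bool.and_true, Bool.true_and, Bool.not_true, Bool.not_false, bne_self_eq_false,
          Bool.true_bne, Bool.false_bne, Bool.false_eq_true, if_false, if_true,
          Bool.bne_false, Bool.bne_true, ite_false, ite_true] <;>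
      rw [ih] <;> simp

-- sorted of any duplicate-free list whose members are exactly the p-members of the union
-- is the p-filter of the sorted union.
theorem sorted_sub (u v : PySem.Set String) (s : List String) (p : String → Bool)
    (hnd : s.Nodup)
    (hmem : ∀ x, x ∈ s ↔ x ∈ PySem.Set.union u v ∧ p x = true)
    (hndu : (PySem.Set.union u v).Nodup) :
    PySem.List.sorted s (fun x => x) false
      = (PySem.List.sorted (PySem.Set.union u v) (fun x => x) false).filter p := by
  set un := PySem.List.sorted (PySem.Set.union u v) (fun x => x) false with hun
  have hperm : un.Perm (PySem.Set.union u v) := PySem.List.sorted_perm _ _ _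
  have hndun : un.Nodup := (hperm.nodup_iff).2 hndu
  have hle : un.Pairwise (fun a b : String => a ≤ b) := PySem.List.sorted_pairwise _ _
  have hlt : un.Pairwise (fun a b : String => a < b) :=
    (hle.and hndun).imp (fun h => lt_of_le_of_ne h.1 h.2)
  apply PySem.List.sorted_eq_of_perm_of_pairwise_lt
  · refine (List.perm_ext_iff_of_nodup (hndun.filter p) hnd).2 ?_
    intro x
    simp only [List.mem_filter, hmem, hperm.mem_iff]
  · exact hlt.filter p

theorem uplift_and_volumes_eq (top_uplift top_volumes : List String) :
    uplift_and_volumes top_uplift top_volumes = uplift_and_volumes_alt top_uplift top_volumes := by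
  unfold uplift_and_volumes uplift_and_volumes_alt
  simp only []
  set u := PySem.Set.ofList top_uplift with hu
  set v := PySem.Set.ofList top_volumes with hv
  have hnu : u.Nodup := PySem.Set.nodup_ofList _
  have hndu : (PySem.Set.union u v).Nodup := PySem.Set.nodup_union _ _ hnu
  rw [foldl_classify]
  simp only [List.nil_append]
  refine List.ext_getElem (by simp) ?_
  intro i h1 h2
  match i, h2 with
  | 0, _ =>
      simp only [List.getElem_cons_zero]
      apply sorted_sub u v _ _ (PySem.Set.nodup_inter _ _ hnu)
      · intro x
        simp [PySem.Set.mem_inter, PySem.Set.mem_union]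
        tauto
      · exact hndu
  | 1, _ => simp
  | 2, _ =>
      simp only [List.getElem_cons_succ, List.getElem_cons_zero]
      apply sorted_sub u v _ _ (PySem.Set.nodup_diff _ _ hnu)
      · intro x
        simp [PySem.Set.mem_diff, PySem.Set.mem_union]
        tauto
      · exact hndu
  | 3, _ =>
      simp only [List.getElem_cons_succ, List.getElem_cons_zero]
      apply sorted_sub u v _ _ (PySem.Set.nodup_symmDiff _ _ hnu (PySem.Set.nodup_ofList _))
      · intro x
        have : ∀ a b : Bool, (a != b) = true ↔ (a = true ∧ ¬ b = true) ∨ (b = true ∧ ¬ a = true) := by decide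
        simp [PySem.Set.mem_symmDiff, PySem.Set.mem_union, this, ← hv]
        tauto
      · exact hndu

-- ===== VERDICT (by name: the statement is the Claim_ definition above) =====
theorem uplift_and_volumes_spec : Claim_equal_uplift_and_volumes := by
  intro tu tv _
  exact uplift_and_volumes_eq tu tv
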